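-- pv_equiv track=rewrite | github.com/robertreimann/dsa | Backtracking/partitions.py | min_substring_partition
-- ===== SOURCE A (Python) =====
-- from collections import defaultdict
-- from functools import cache
--
-- def min_substring_partition(s):
--     @cache
--     def dfs(i):
--         if i == len(s):
--             return 0
--
--         frequency_map = defaultdict(lambda: 0)
--         count = float('inf')
--         for j in range(i, len(s)):
--             frequency_map[s[j]] += 1
--             if len(set(frequency_map.values())) == 1: # <-- This here is the key line, the partitioning condition
--                 count = min(count, 1 + dfs(j + 1))
--         return count
--     return dfs(0)
-- ===== SOURCE B (Python) =====
-- def min_substring_partition(s):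
--     # Bottom-up DP over suffixes; a block s[i:j+1] is balanced iff
--     # max_count * distinct == block length, both tracked incrementally.
--     n = len(s)
--     dp = [0] * (n + 1)
--     for i in range(n - 1, -1, -1):
--         counts = {s[i]: 1}
--         max_count = 1
--         distinct = 1
--         best = 1 + dp[i + 1]  # the single-char block s[i] is always balanced
--         for j in range(i + 1, n):
--             c = s[j]
--             cur = counts.get(c, 0) + 1
--             counts[c] = cur
--             if cur == 1:
--                 distinct += 1
--             if cur > max_count:
--                 max_count = cur
--             if max_count * distinct == j - i + 1:
--                 best = min(best, 1 + dp[j + 1])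
--         dp[i] = best
--     return dp[0]
-- ===== Notes on version B (the rewrite author's own statement) =====
-- stated objective: faster
-- what changed: Replaces the memoized top-down recursion that rebuilds set(frequency_map.values()) at every step (O(alphabet) per step, O(n^2*alphabet), O(n^3) worst case) by a bottom-up suffix DP whose balance test is the O(1) incremental check max_count*distinct == block length.
import Mathlib
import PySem

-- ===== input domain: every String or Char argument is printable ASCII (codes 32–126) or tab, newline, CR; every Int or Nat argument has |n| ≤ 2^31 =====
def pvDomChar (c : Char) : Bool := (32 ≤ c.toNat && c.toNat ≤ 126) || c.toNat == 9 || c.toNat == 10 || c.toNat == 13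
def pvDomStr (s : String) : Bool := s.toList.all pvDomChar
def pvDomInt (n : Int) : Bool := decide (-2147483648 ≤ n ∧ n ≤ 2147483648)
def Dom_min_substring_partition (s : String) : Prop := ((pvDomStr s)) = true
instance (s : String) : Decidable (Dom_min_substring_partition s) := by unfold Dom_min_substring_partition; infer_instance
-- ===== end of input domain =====

-- B replaces A's memoized recursion with per-step set(frequency_map.values()) rebuilds by a
-- bottom-up suffix DP with the O(1) incremental balance test max_count*distinct == length (faster).

-- ===== PORT A =====
-- float('inf') is modelled as `none` (it is never the final result: the single-char block is
-- always balanced, so `count` becomes `some _` at the first loop step).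
def pvMinOpt : Option Int → Option Int → Option Int
  | none, o => o
  | some a, none => some a
  | some a, some b => some (min a b)

-- dfs(i) is ported over the remaining suffix s[i:]; s[j] for j = i.. are exactly its elements
-- in order, and dfs(j+1) is dfs on the suffix after position j.
mutual
def pvDfsA : List Char → Option Int
  | [] => some 0
  | c :: cs => pvLoopA (c :: cs) PySem.Dict.empty none
  termination_by t => (t.length, 1)
def pvLoopA : List Char → PySem.Dict Char Int → Option Int → Option Int
  | [], _, count => count
  | c :: rest, freq, count =>
    let freq' := freq.insert c (freq.getD c 0 + 1)
    let count' := if (PySem.Set.ofList freq'.values).length == 1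
      then pvMinOpt count ((pvDfsA rest).map (fun v => 1 + v)) else count
    pvLoopA rest freq' count'
  termination_by t _ _ => (t.length, 0)
end

def min_substring_partition (s : String) : Int := (pvDfsA s.toList).getD 0

-- ===== PORT B =====
-- inner loop over j: remaining chars paired with the dp segment dp[j+1..]
def pvInnerB : List Char → List Int → PySem.Dict Char Int → Int → Int → Int → Int → Int
  | [], _, _, _, _, _, best => best
  | c :: cs, dp, counts, maxc, dist, len, best =>
    let cur := counts.getD c 0 + 1
    let counts' := counts.insert c cur
    let dist' := if cur == 1 then dist + 1 else dist
    let maxc' := if cur > maxc then cur else maxc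
    let len' := len + 1
    let best' := if maxc' * dist' == len' then min best (1 + dp.headI) else best
    pvInnerB cs dp.tail counts' maxc' dist' len' best'

-- dp built back-to-front: pvBuild (s[i:]) = [dp[i], dp[i+1], …, dp[n]]
def pvBuild : List Char → List Int
  | [] => [0]
  | c :: cs =>
    let dp := pvBuild cs
    pvInnerB cs dp.tail (PySem.Dict.empty.insert c 1) 1 1 1 (1 + dp.headI) :: dp

def min_substring_partition_alt (s : String) : Int := (pvBuild s.toList).headI

-- ===== PRECONDITION & SPEC =====
def Spec_min_substring_partition (s : String) (out : Int) : Prop := out = min_substring_partition_alt s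
instance (s : String) (out : Int) : Decidable (Spec_min_substring_partition s out) := by unfold Spec_min_substring_partition; infer_instance

-- ===== CLAIM (what is proved, stated in full; the proofs are below) =====
def Claim_equal_min_substring_partition : Prop := ∀ (s : String), Dom_min_substring_partition s → Spec_min_substring_partition s (min_substring_partition s)

-- ===== LEMMAS AND PROOFS =====

-- the multiset of frequencies of the prefix p, as A's frequency_map.values() lists it
def pvVals (p : List Char) : List Int := (PySem.Set.ofList p).map (fun c => (p.count c : Int))

def pvF : List Char → Int := fun u => (pvBuild u).headI

lemma pvMemVals (q : List Char) (v : Int) : v ∈ pvVals q ↔ ∃ x, x ∈ q ∧ v = (q.count x : Int) := by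
  simp [pvVals, PySem.Set.mem_ofList, eq_comm]
lemma pvValuesCounter (p : List Char) : (PySem.Dict.counter p).values = pvVals p := by
  simp [PySem.Dict.values, PySem.Dict.items_counter, pvVals, List.map_map]
lemma pvCounterStep (p : List Char) (c : Char) :
    (PySem.Dict.counter p).insert c ((PySem.Dict.counter p).getD c 0 + 1)
      = PySem.Dict.counter (p ++ [c]) := by
  have h := PySem.Dict.foldl_insert_getD_add_one_eq_counter (xs := p ++ [c])
  rw [List.foldl_append] at h
  simpa [PySem.Dict.foldl_insert_getD_add_one_eq_counter] using h
lemma pvCounterBase (c : Char) : PySem.Dict.empty.insert c 1 = PySem.Dict.counter [c] := by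
  have h := PySem.Dict.foldl_insert_getD_add_one_eq_counter (xs := [c])
  simpa using h
lemma pvSumVals (p : List Char) : (pvVals p).sum = (p.length : Int) := by
  have hperm : (PySem.Set.ofList p).Perm p.dedup := by
    rw [List.perm_ext_iff_of_nodup (PySem.Set.nodup_ofList p) p.nodup_dedup]
    intro a; simp [PySem.Set.mem_ofList]
  have h2 : ((PySem.Set.ofList p).map (fun c => (p.count c : Int))).Perm
      (p.dedup.map (fun c => (p.count c : Int))) := hperm.map _
  rw [pvVals, h2.sum_eq]
  conv_rhs => rw [← p.sum_map_count_dedup_eq_length]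
  push_cast [Nat.cast_list_sum, List.map_map]
  rfl
lemma pvSetLenOne (l : List Int) (m : Int) (hm : m ∈ l) (_hub : ∀ v ∈ l, v ≤ m) :
    ((PySem.Set.ofList l).length = 1 ↔ ∀ v ∈ l, v = m) := by
  constructor
  · intro h v hv
    obtain ⟨x, hx⟩ : ∃ x, PySem.Set.ofList l = [x] := by
      match hl : PySem.Set.ofList l, h with
      | [x], _ => exact ⟨x, rfl⟩
    have h1 : v = x := by
      have := (PySem.Set.mem_ofList l v).2 hv; rw [hx] at this; simpa using this
    have h2 : m = x := by
      have := (PySem.Set.mem_ofList l m).2 hm; rw [hx] at this; simpa using this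
    rw [h1, h2]
  · intro h
    have hmem : m ∈ PySem.Set.ofList l := (PySem.Set.mem_ofList _ _).2 hm
    have hall : ∀ y ∈ PySem.Set.ofList l, y = m := by
      intro y hy; exact h y ((PySem.Set.mem_ofList _ _).1 hy)
    have hnd := PySem.Set.nodup_ofList l
    match hl : PySem.Set.ofList l, hmem, hall, hnd with
    | [x], _, _, _ => rfl
    | x :: y :: t, _, hall, hnd =>
      exfalso
      have hx : x = m := hall x (by simp)
      have hy : y = m := hall y (by simp)
      rw [List.nodup_cons] at hnd
      exact hnd.1 (by simp [hx, hy])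
lemma pvSumLe (l : List Int) (m : Int) (hub : ∀ v ∈ l, v ≤ m) : l.sum ≤ m * l.length := by
  induction l with
  | nil => simp
  | cons a t ih =>
    have h1 := hub a (by simp)
    have h2 := ih (fun v hv => hub v (by simp [hv]))
    simp only [List.sum_cons, List.length_cons]
    push_cast
    nlinarith
lemma pvSumAllEq (l : List Int) (m : Int) (hub : ∀ v ∈ l, v ≤ m) :
    (l.sum = m * l.length ↔ ∀ v ∈ l, v = m) := by
  induction l with
  | nil => simp
  | cons a t ih =>
    have h1 := hub a (by simp)
    have h2 := pvSumLe t m (fun v hv => hub v (by simp [hv]))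
    have ih' := ih (fun v hv => hub v (by simp [hv]))
    simp only [List.sum_cons, List.length_cons, List.mem_cons]
    constructor
    · intro h
      have hmul : m * (↑t.length + 1) = m * t.length + m := by ring
      push_cast at h
      rw [hmul] at h
      have ha : a = m := by linarith
      have ht : t.sum = m * t.length := by linarith
      intro v hv
      rcases hv with rfl | hv
      · exact ha
      · exact ih'.1 ht v hv
    · intro h
      have ha : a = m := h a (Or.inl rfl)
      have ht : t.sum = m * t.length := ih'.2 (fun v hv => h v (Or.inr hv))
      push_cast
      rw [ha, ht]; ring
lemma pvCheck (p : List Char) (m : Int) (hm : m ∈ pvVals p) (hub : ∀ v ∈ pvVals p, v ≤ m) :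
    (((PySem.Set.ofList (pvVals p)).length == 1) : Bool)
      = (m * ((PySem.Set.ofList p).length : Int) == (p.length : Int)) := by
  have h1 := pvSetLenOne (pvVals p) m hm hub
  have h2 := pvSumAllEq (pvVals p) m hub
  have hlen : (pvVals p).length = (PySem.Set.ofList p).length := by simp [pvVals]
  have hsum := pvSumVals p
  rw [Bool.eq_iff_iff]
  simp only [beq_iff_eq]
  rw [h1, ← hsum, ← hlen]
  rw [show (m * ((pvVals p).length : Int) = (pvVals p).sum ↔ (pvVals p).sum = m * (pvVals p).length) from eq_comm]
  exact h2.symm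
lemma pvStepDist (p : List Char) (c : Char) :
    ((PySem.Set.ofList (p ++ [c])).length : Int)
      = if ((p.count c : Int) + 1 == 1 : Bool) then ((PySem.Set.ofList p).length : Int) + 1
        else ((PySem.Set.ofList p).length : Int) := by
  rw [PySem.Set.ofList_append_singleton]
  by_cases hc : c ∈ p
  · have h0 : 0 < p.count c := List.count_pos_iff.2 hc
    have hcond : (((p.count c : Int) + 1 == 1) : Bool) = false := by
      rw [beq_eq_false_iff_ne]
      omega
    rw [hcond]
    simp [PySem.Set.add, PySem.Set.mem_ofList, hc]
  · have h0 : p.count c = 0 := List.count_eq_zero.2 hc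
    have hcond : (((p.count c : Int) + 1 == 1) : Bool) = true := by
      simp [h0]
    rw [hcond]
    simp [PySem.Set.add, PySem.Set.mem_ofList, hc]
lemma pvStepMax (p : List Char) (c : Char) (m : Int)
    (hm : m ∈ pvVals p) (hub : ∀ v ∈ pvVals p, v ≤ m) :
    (if ((p.count c : Int) + 1 > m : Prop) then (p.count c : Int) + 1 else m) ∈ pvVals (p ++ [c])
    ∧ ∀ v ∈ pvVals (p ++ [c]), v ≤ (if ((p.count c : Int) + 1 > m : Prop) then (p.count c : Int) + 1 else m) := by
  have hcnt : ∀ x, (p ++ [c]).count x = p.count x + (if x = c then 1 else 0) := by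
    intro x; simp [List.count_append, List.count_singleton]
    rcases eq_or_ne x c with rfl | h
    · simp
    · simp [h, Ne.symm h]
  constructor
  · by_cases hgt : (p.count c : Int) + 1 > m
    · rw [if_pos hgt]
      rw [pvMemVals]
      exact ⟨c, by simp, by rw [hcnt c]; push_cast; simp⟩
    · rw [if_neg hgt]
      obtain ⟨x, hx, hv⟩ := (pvMemVals p m).1 hm
      have hxc : x ≠ c := by
        intro h; rw [h] at hv; omega
      rw [pvMemVals]
      exact ⟨x, by simp [hx], by rw [hcnt x, if_neg hxc, hv]; simp⟩
  · intro v hv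
    obtain ⟨x, hx, hv⟩ := (pvMemVals _ v).1 hv
    rw [hcnt x] at hv
    by_cases hxc : x = c
    · subst hxc
      rw [if_pos rfl] at hv
      by_cases hgt : (p.count x : Int) + 1 > m
      · rw [if_pos hgt]; push_cast at hv ⊢; omega
      · rw [if_neg hgt]; push_cast at hv ⊢; omega
    · rw [if_neg hxc] at hv
      have hxp : x ∈ p := by
        rcases List.mem_append.1 hx with h | h
        · exact h
        · simp at h; exact absurd h hxc
      have := hub ((p.count x : Int)) ((pvMemVals p _).2 ⟨x, hxp, rfl⟩)
      split <;> omega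

lemma pvHeadTails (f : List Char → Int) (l : List Char) : (l.tails.map f).headI = f l := by
  cases l <;> simp [List.tails]

lemma pvMain (rem : List Char) : ∀ (p : List Char) (m cnt : Int),
    p ≠ [] → m ∈ pvVals p → (∀ v ∈ pvVals p, v ≤ m) →
    (∀ u : List Char, u.length < rem.length → pvDfsA u = some (pvF u)) →
    pvLoopA rem (PySem.Dict.counter p) (some cnt)
      = some (pvInnerB rem ((rem.tails.map pvF).tail) (PySem.Dict.counter p) m
          ((PySem.Set.ofList p).length : Int) (p.length : Int) cnt) := by
  induction rem with
  | nil =>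
    intro p m cnt hp hm hub H
    simp [pvLoopA, pvInnerB]
  | cons c cs ih =>
    intro p m cnt hp hm hub H
    obtain ⟨hm'mem, hm'ub⟩ := pvStepMax p c m hm hub
    have hget : (PySem.Dict.counter p).getD c 0 = (p.count c : Int) :=
      PySem.Dict.getD_counter p c
    have hdfs : pvDfsA cs = some (pvF cs) := H cs (by simp)
    have htails : ((c :: cs).tails.map pvF).tail = cs.tails.map pvF := by
      simp
    have hstep : (PySem.Dict.counter p).insert c ((p.count c : Int) + 1)
        = PySem.Dict.counter (p ++ [c]) := by rw [← hget]; exact pvCounterStep p c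
    rw [pvLoopA, pvInnerB]
    simp only [hget, htails]
    rw [hstep]
    have hcheckA :
        (((PySem.Set.ofList (PySem.Dict.counter (p ++ [c])).values).length == 1) : Bool)
          = ((if (p.count c : Int) + 1 > m then (p.count c : Int) + 1 else m)
              * ((PySem.Set.ofList (p ++ [c])).length : Int) == ((p ++ [c]).length : Int)) := by
      rw [pvValuesCounter]
      exact pvCheck (p ++ [c]) _ hm'mem hm'ub
    have hdist := pvStepDist p c
    have hlen : (((p ++ [c]).length : Nat) : Int) = (p.length : Int) + 1 := by
      simp
    rw [hcheckA, hdfs]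
    simp only [Option.map_some, pvMinOpt]
    have hhead : (cs.tails.map pvF).headI = pvF cs := pvHeadTails pvF cs
    rw [hhead, ← hdist, ← hlen]
    have hne : p ++ [c] ≠ [] := by simp
    by_cases hcond : ((if (p.count c : Int) + 1 > m then (p.count c : Int) + 1 else m)
        * ((PySem.Set.ofList (p ++ [c])).length : Int) == ((p ++ [c]).length : Int)) = true
    · rw [if_pos hcond, if_pos hcond]
      exact ih (p ++ [c]) _ _ hne hm'mem hm'ub (fun u hu => H u (by simp; omega))
    · rw [if_neg hcond, if_neg hcond]
      exact ih (p ++ [c]) _ _ hne hm'mem hm'ub (fun u hu => H u (by simp; omega))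

lemma pvAllAux : ∀ (n : Nat) (t : List Char), t.length ≤ n →
    (pvDfsA t = some (pvF t) ∧ pvBuild t = t.tails.map pvF) := by
  intro n
  induction n with
  | zero =>
    intro t ht
    have : t = [] := List.length_eq_zero_iff.1 (Nat.le_zero.1 ht)
    subst this
    exact ⟨by rw [pvDfsA]; rfl, rfl⟩
  | succ n ih =>
    intro t ht
    match t with
    | [] => exact ⟨by rw [pvDfsA]; rfl, rfl⟩
    | c :: cs =>
      have hcs : cs.length ≤ n := by simpa using ht
      have ihcs := ih cs hcs
      have hval : pvVals [c] = [1] := by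
        simp [pvVals, PySem.Set.ofList_cons, PySem.Set.ofList_nil, PySem.Set.discard]
      have h2 : pvBuild (c :: cs) = (c :: cs).tails.map pvF := by
        rw [List.tails_cons, List.map_cons, ← ihcs.2]
        rfl
      refine ⟨?_, h2⟩
      have hhead : (cs.tails.map pvF).headI = pvF cs := pvHeadTails pvF cs
      have hmain := pvMain cs [c] 1 (1 + pvF cs) (by simp)
        (by rw [hval]; simp) (by rw [hval]; simp)
        (fun u hu => (ih u (by omega)).1)
      rw [pvDfsA, pvLoopA]
      simp only [PySem.Dict.getD_empty, zero_add, ihcs.1, Option.map_some, pvMinOpt]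
      rw [pvCounterBase]
      have hcheck : (((PySem.Set.ofList (PySem.Dict.counter [c]).values).length == 1) : Bool)
          = true := by
        rw [pvValuesCounter, hval]; decide
      rw [hcheck, if_pos rfl, hmain]
      have hpvF : pvF (c :: cs)
          = pvInnerB cs ((pvBuild cs).tail) (PySem.Dict.empty.insert c 1) 1 1 1
              (1 + (pvBuild cs).headI) := rfl
      rw [hpvF, ihcs.2, hhead, pvCounterBase]
      norm_num [PySem.Set.ofList_cons, PySem.Set.ofList_nil, PySem.Set.discard]

lemma pvAll (t : List Char) : pvDfsA t = some (pvF t) ∧ pvBuild t = t.tails.map pvF :=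
  pvAllAux t.length t le_rfl

-- ===== VERDICT (by name: the statement is the Claim_ definition above) =====
theorem min_substring_partition_spec : Claim_equal_min_substring_partition := by
  intro s _
  unfold Spec_min_substring_partition min_substring_partition min_substring_partition_alt
  rw [(pvAll s.toList).1]
  rfl
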